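-- pv_equiv track=rewrite | github.com/Leejangha/Algorhythm | 프로그래머스/lv1/12930. 이상한 문자 만들기/이상한 문자 만들기.py | solution
-- ===== SOURCE A (Python) =====
-- def solution(s):
--     answer = ''
--     idx = 0
--     for char in s:
--         if char.isalpha():
--             if idx%2 == 0:
--                 answer += char.upper()
--             else:
--                 answer += char.lower()
--             idx += 1
--         else:
--             answer += char
--             idx = 0
--
--     return answer
-- ===== SOURCE B (Python) =====
-- def solution(s):
--     out = []
--     i = 0
--     n = len(s)
--     while i < n:
--         j = i
--         if s[i].isalpha():
--             while j < n and s[j].isalpha():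
--                 j += 1
--             out.append(''.join(c.upper() if k % 2 == 0 else c.lower()
--                                for k, c in enumerate(s[i:j])))
--         else:
--             while j < n and not s[j].isalpha():
--                 j += 1
--             out.append(s[i:j])
--         i = j
--     return ''.join(out)
-- ===== Notes on version B (the rewrite author's own statement) =====
-- stated objective: alternative
-- what changed: Replaced A's single character scan with a mutable parity counter (reset on every non-alpha char) by a run-based algorithm: the string is split into maximal alpha/non-alpha runs, alpha runs are rewritten by per-run enumeration (even index upper, odd lower), non-alpha runs are copied verbatim, and the pieces are joined.
import Mathlib
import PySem

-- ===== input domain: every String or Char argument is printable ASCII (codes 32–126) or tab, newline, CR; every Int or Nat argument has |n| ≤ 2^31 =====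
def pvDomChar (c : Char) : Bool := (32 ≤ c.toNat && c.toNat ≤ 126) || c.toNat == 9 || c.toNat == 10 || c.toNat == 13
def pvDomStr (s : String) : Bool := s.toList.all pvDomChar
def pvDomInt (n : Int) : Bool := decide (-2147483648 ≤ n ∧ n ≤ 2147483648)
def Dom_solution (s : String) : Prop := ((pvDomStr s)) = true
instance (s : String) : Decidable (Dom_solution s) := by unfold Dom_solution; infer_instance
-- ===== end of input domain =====

-- B replaces A's single scan with a resetting parity counter by a split into maximal
-- alpha/non-alpha runs, each alpha run rewritten by per-run enumeration (objective: alternative).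

-- ===== PORT A =====
-- A: one pass; alpha chars get upper/lower by the parity of idx, which resets on every non-alpha.
def solution (s : String) : String :=
  let st := s.toList.foldl
    (fun (st : List Char × Int) c =>
      if PySem.Chars.isalpha c then
        (st.1 ++ [if PySem.Int.mod st.2 2 == 0 then PySem.Chars.upperChar c
                  else PySem.Chars.lowerChar c],
         st.2 + 1)
      else
        (st.1 ++ [c], 0))
    ([], 0)
  String.ofList st.1

-- ===== PORT B =====
-- per-run rewrite of an alpha run: even enumerate index → upper, odd → lower
def pvRunMap (run : List Char) : List Char :=
  (PySem.List.enumerate run 0).map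
    (fun p => if PySem.Int.mod p.1 2 == 0 then PySem.Chars.upperChar p.2
              else PySem.Chars.lowerChar p.2)

-- split into maximal runs by isalpha; alpha runs rewritten, others kept
def pvRuns : List Char → List (List Char)
  | [] => []
  | c :: cs =>
    if PySem.Chars.isalpha c then
      pvRunMap (c :: cs.takeWhile (fun d => PySem.Chars.isalpha d))
        :: pvRuns (cs.dropWhile (fun d => PySem.Chars.isalpha d))
    else
      (c :: cs.takeWhile (fun d => !PySem.Chars.isalpha d))
        :: pvRuns (cs.dropWhile (fun d => !PySem.Chars.isalpha d))
termination_by xs => xs.length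
decreasing_by
  · exact Nat.lt_succ_of_le (List.length_dropWhile_le _ _)
  · exact Nat.lt_succ_of_le (List.length_dropWhile_le _ _)

def solution_alt (s : String) : String :=
  String.ofList (pvRuns s.toList).flatten

-- ===== PRECONDITION & SPEC =====
def Spec_solution (s : String) (out : String) : Prop := out = solution_alt s
instance (s : String) (out : String) : Decidable (Spec_solution s out) := by unfold Spec_solution; infer_instance

-- ===== CLAIM (what is proved, stated in full; the proofs are below) =====
def Claim_equal_solution : Prop := ∀ (s : String), Dom_solution s → Spec_solution s (solution s)

-- ===== LEMMAS AND PROOFS =====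

-- parity-mapped run starting at counter value k (proof-side recursion)
def pvEnumMap (k : Nat) : List Char → List Char
  | [] => []
  | c :: cs =>
    (if k % 2 == 0 then PySem.Chars.upperChar c else PySem.Chars.lowerChar c)
      :: pvEnumMap (k + 1) cs

lemma pvRuns_cons_alpha (c : Char) (cs : List Char) (hc : PySem.Chars.isalpha c = true) :
    pvRuns (c :: cs)
      = pvRunMap (c :: cs.takeWhile (fun d => PySem.Chars.isalpha d))
          :: pvRuns (cs.dropWhile (fun d => PySem.Chars.isalpha d)) := by
  rw [pvRuns.eq_def]; simp [hc]

lemma pvRuns_cons_nonalpha (c : Char) (cs : List Char) (hc : ¬ PySem.Chars.isalpha c = true) :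
    pvRuns (c :: cs)
      = (c :: cs.takeWhile (fun d => !PySem.Chars.isalpha d))
          :: pvRuns (cs.dropWhile (fun d => !PySem.Chars.isalpha d)) := by
  rw [pvRuns.eq_def]; simp [hc]

lemma pvRunMap_eq_enumMap (run : List Char) :
    ∀ k : Nat,
      (PySem.List.enumerate run (k : Int)).map
        (fun p => if PySem.Int.mod p.1 2 == 0 then PySem.Chars.upperChar p.2
                  else PySem.Chars.lowerChar p.2) = pvEnumMap k run := by
  induction run with
  | nil => intro k; simp [PySem.List.enumerate_nil, pvEnumMap]
  | cons c cs ih =>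
    intro k
    rw [PySem.List.enumerate_cons, List.map_cons]
    have h2 : ((k : Int) + 1) = ((k + 1 : Nat) : Int) := by push_cast; ring
    rw [h2, ih (k + 1)]
    have hm : PySem.Int.mod (k : Int) 2 = ((k % 2 : Nat) : Int) :=
      PySem.Int.mod_natCast k 2
    simp only [pvEnumMap, hm]
    by_cases hk : k % 2 = 0
    · simp [hk]
    · have hdvd : ¬ ((2:Int) ∣ (k : Int)) := by omega
      simp [hk, hdvd]

lemma pvRunMap_eq (run : List Char) : pvRunMap run = pvEnumMap 0 run := by
  have h := pvRunMap_eq_enumMap run 0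
  simpa [pvRunMap] using h

-- flatten of pvRuns seen from an arbitrary split point: the non-alpha/alpha head cases agree
lemma pvRuns_flatten_shift (cs : List Char) :
    cs.takeWhile (fun d => !PySem.Chars.isalpha d)
      ++ (pvRuns (cs.dropWhile (fun d => !PySem.Chars.isalpha d))).flatten
    = pvEnumMap 0 (cs.takeWhile (fun d => PySem.Chars.isalpha d))
      ++ (pvRuns (cs.dropWhile (fun d => PySem.Chars.isalpha d))).flatten := by
  cases cs with
  | nil => simp [pvRuns, pvEnumMap]
  | cons d ds =>
    by_cases hd : PySem.Chars.isalpha d = true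
    · simp only [List.takeWhile_cons, List.dropWhile_cons, hd, Bool.not_true]
      simp only [Bool.false_eq_true, if_false, if_true, List.nil_append]
      rw [pvRuns_cons_alpha d ds hd]
      simp [pvRunMap_eq, pvEnumMap]
    · simp only [List.takeWhile_cons, List.dropWhile_cons, hd]
      simp only [Bool.not_eq_true] at hd
      simp only [hd, Bool.not_false, Bool.false_eq_true, if_false, if_true]
      rw [pvRuns_cons_nonalpha d ds (by simp [hd])]
      simp [pvEnumMap]

-- main invariant: A's fold from counter k produces the parity-mapped alpha prefix at offset k,
-- then B's run decomposition of the rest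
lemma pvMain (xs : List Char) :
    ∀ (acc : List Char) (k : Nat),
      (xs.foldl
        (fun (st : List Char × Int) c =>
          if PySem.Chars.isalpha c then
            (st.1 ++ [if PySem.Int.mod st.2 2 == 0 then PySem.Chars.upperChar c
                      else PySem.Chars.lowerChar c],
             st.2 + 1)
          else
            (st.1 ++ [c], 0))
        (acc, (k : Int))).1
      = acc ++ pvEnumMap k (xs.takeWhile (fun d => PySem.Chars.isalpha d))
            ++ (pvRuns (xs.dropWhile (fun d => PySem.Chars.isalpha d))).flatten := by
  induction xs with
  | nil => intro acc k; simp [pvRuns, pvEnumMap]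
  | cons c cs ih =>
    intro acc k
    by_cases hc : PySem.Chars.isalpha c = true
    · simp only [List.foldl_cons, List.takeWhile_cons, List.dropWhile_cons, hc, if_true]
      have hm : PySem.Int.mod (k : Int) 2 = ((k % 2 : Nat) : Int) :=
        PySem.Int.mod_natCast k 2
      have h2 : ((k : Int) + 1) = ((k + 1 : Nat) : Int) := by push_cast; ring
      rw [hm, h2, ih]
      simp only [pvEnumMap]
      by_cases hk : k % 2 = 0
      · simp [hk]
      · have hdvd : ¬ ((2:Int) ∣ (k : Int)) := by omega
        simp [hk, hdvd]
    · simp only [List.foldl_cons, List.takeWhile_cons, List.dropWhile_cons, hc,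
        Bool.false_eq_true, if_false]
      have ih0 := ih (acc ++ [c]) 0
      rw [Nat.cast_zero] at ih0
      rw [ih0, pvRuns_cons_nonalpha c cs hc]
      have hshift := pvRuns_flatten_shift cs
      simp only [pvEnumMap, List.flatten_cons, List.append_assoc, List.cons_append,
        List.nil_append]
      rw [← hshift]

lemma pvList_eq (xs : List Char) :
    (xs.foldl
      (fun (st : List Char × Int) c =>
        if PySem.Chars.isalpha c then
          (st.1 ++ [if PySem.Int.mod st.2 2 == 0 then PySem.Chars.upperChar c
                    else PySem.Chars.lowerChar c],
           st.2 + 1)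
        else
          (st.1 ++ [c], 0))
      ([], 0)).1 = (pvRuns xs).flatten := by
  have h := pvMain xs [] 0
  rw [Nat.cast_zero] at h
  rw [h]
  cases xs with
  | nil => simp [pvRuns, pvEnumMap]
  | cons c cs =>
    by_cases hc : PySem.Chars.isalpha c = true
    · rw [pvRuns_cons_alpha c cs hc]
      simp only [List.takeWhile_cons, List.dropWhile_cons, hc, if_true]
      simp [pvRunMap_eq, pvEnumMap]
    · simp only [List.takeWhile_cons, List.dropWhile_cons, hc, Bool.false_eq_true, if_false,
        pvEnumMap, List.nil_append]

-- ===== VERDICT (by name: the statement is the Claim_ definition above) =====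
theorem solution_spec : Claim_equal_solution := by
  intro s _
  unfold Spec_solution solution solution_alt
  exact congrArg String.ofList (pvList_eq s.toList)
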